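-- pv_equiv track=rewrite | github.com/kojiishi/aosp-noto-fonts | ls-fonts.py | split_style_locale
-- ===== SOURCE A (Python) =====
-- def split_prefix(name: str, prefix: str):
--     if name.startswith(prefix):
--         return (prefix, name[len(prefix):])
--     return (None, name)
--
-- def split_style_locale(name: str):
--     if not name.startswith('Noto'):
--         return (None, None, None)
--     name = name[4:]
--     for prefix in ('Sans', 'Serif'):
--         style, name = split_prefix(name, prefix)
--         if style:
--             break
--     pitch, locale = split_prefix(name, 'Mono')
--     return (style, pitch, locale)
-- ===== SOURCE B (Python) =====
-- import re
--
-- _PAT = re.compile(r'^Noto(Sans|Serif)?(Mono)?(.*)$', re.DOTALL)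
--
-- def split_style_locale(name: str):
--     m = _PAT.match(name)
--     if m is None:
--         return (None, None, None)
--     return (m.group(1), m.group(2), m.group(3))
-- ===== Notes on version B (the rewrite author's own statement) =====
-- stated objective: idiomatic
-- what changed: Replaces the manual prefix-stripping helper and the Sans/Serif loop with a single anchored compiled regex whose optional groups yield style, pitch and locale directly.
import Mathlib
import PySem

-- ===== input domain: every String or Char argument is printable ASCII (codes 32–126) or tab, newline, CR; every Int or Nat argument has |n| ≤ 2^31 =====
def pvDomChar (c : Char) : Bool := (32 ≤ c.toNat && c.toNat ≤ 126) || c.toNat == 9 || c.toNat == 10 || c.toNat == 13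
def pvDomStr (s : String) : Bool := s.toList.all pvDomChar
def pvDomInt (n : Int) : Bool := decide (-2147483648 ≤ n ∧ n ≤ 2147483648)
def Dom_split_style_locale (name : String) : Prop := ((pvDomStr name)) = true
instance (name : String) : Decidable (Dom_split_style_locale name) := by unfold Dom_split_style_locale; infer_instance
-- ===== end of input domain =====

-- B replaces A's split_prefix helper and Sans/Serif loop with one anchored regex; equally fast, more idiomatic.

-- ===== PORT A =====
-- split_prefix(name, prefix)
def pySplitPrefix (name pfx : String) : Option String × String :=
  if PySem.Str.startswith name pfx then
    (some pfx, PySem.Str.slice name (some (PySem.Str.len pfx : Int)) none)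
  else (none, name)

-- Python truthiness of an Optional[str]: None and '' are falsy
def pyStrOptTruthy : Option String → Bool
  | none => false
  | some s => !(s.toList.isEmpty)

-- the `for prefix in ('Sans', 'Serif'): … if style: break` loop, carrying (style, name)
def aStyleLoop : List String → Option String → String → Option String × String
  | [], style, name => (style, name)
  | p :: ps, _, name =>
      let sn := pySplitPrefix name p
      if pyStrOptTruthy sn.1 then (sn.1, sn.2) else aStyleLoop ps sn.1 sn.2

def split_style_locale (name : String) : Option String × Option String × Option String :=
  if !(PySem.Str.startswith name "Noto") then (none, none, none)
  else
    let name1 := PySem.Str.slice name (some 4) none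
    let sn := aStyleLoop ["Sans", "Serif"] none name1
    let pl := pySplitPrefix sn.2 "Mono"
    (sn.1, pl.1, some pl.2)

-- ===== PORT B =====
-- transliteration of the anchored regex ^Noto(Sans|Serif)?(Mono)?(.*)$ (DOTALL):
-- exact here because (.*)$ accepts any remainder, so the optional groups resolve by
-- left-to-right first-prefix preference with no backtracking.
def split_style_locale_alt (name : String) : Option String × Option String × Option String :=
  if PySem.Str.startswith name "Noto" then
    let r0 := PySem.Str.slice name (some 4) none
    let g1 :=
      if PySem.Str.startswith r0 "Sans" then (some "Sans", PySem.Str.slice r0 (some 4) none)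
      else if PySem.Str.startswith r0 "Serif" then (some "Serif", PySem.Str.slice r0 (some 5) none)
      else ((none : Option String), r0)
    let g2 :=
      if PySem.Str.startswith g1.2 "Mono" then (some "Mono", PySem.Str.slice g1.2 (some 4) none)
      else ((none : Option String), g1.2)
    (g1.1, g2.1, some g2.2)
  else (none, none, none)

-- ===== PRECONDITION & SPEC =====
def Spec_split_style_locale (name : String) (out : Option String × Option String × Option String) : Prop := out = split_style_locale_alt name
instance (name : String) (out : Option String × Option String × Option String) : Decidable (Spec_split_style_locale name out) := by unfold Spec_split_style_locale; infer_instance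

-- ===== CLAIM (what is proved, stated in full; the proofs are below) =====
def Claim_equal_split_style_locale : Prop := ∀ (name : String), Dom_split_style_locale name → Spec_split_style_locale name (split_style_locale name)

-- ===== LEMMAS AND PROOFS =====
theorem len_Sans : (PySem.Str.len "Sans" : Int) = 4 := by decide
theorem len_Serif : (PySem.Str.len "Serif" : Int) = 5 := by decide
theorem len_Mono : (PySem.Str.len "Mono" : Int) = 4 := by decide

-- ===== VERDICT (by name: the statement is the Claim_ definition above) =====
theorem split_style_locale_spec : Claim_equal_split_style_locale := by
  intro name _
  unfold Spec_split_style_locale split_style_locale split_style_locale_alt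
  simp only [aStyleLoop, pySplitPrefix, pyStrOptTruthy, len_Sans, len_Serif, len_Mono]
  split_ifs <;> simp_all
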